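-- pv_equiv track=rewrite | github.com/jahanshah/NeoAntigen2026-aws-rerun | code/steps/08_peptide_extract.py | frameshift_junction_peptides
-- ===== SOURCE A (Python) =====
-- def frameshift_junction_peptides(wt_seq: str, fs_pos: int,
--                                   new_seq_suffix: str, lengths: list) -> list:
--     """
--     Extract junction peptides spanning the frameshift boundary.
--     WT prefix (up to fs_pos) + novel suffix.
--     """
--     peptides = []
--     prefix = wt_seq[:fs_pos]
--     novel  = prefix + new_seq_suffix
--     for k in lengths:
--         start = max(0, fs_pos - k + 1)
--         for i in range(start, min(fs_pos + 1, len(novel) - k + 1)):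
--             pep = novel[i:i+k]
--             if "*" not in pep and "X" not in pep and len(pep) == k:
--                 peptides.append(pep)
--     return peptides
-- ===== SOURCE B (Python) =====
-- def frameshift_junction_peptides(wt_seq: str, fs_pos: int,
--                                   new_seq_suffix: str, lengths: list) -> list:
--     """
--     Extract junction peptides spanning the frameshift boundary.
--     Precomputes, for every position i of the novel sequence, the index of
--     the next '*'/'X' at or after i; each candidate window is then accepted
--     or rejected by a single comparison, and only accepted windows are sliced.
--     """
--     novel = wt_seq[:fs_pos] + new_seq_suffix
--     n = len(novel)
--     # nxt[i] = smallest j >= i with novel[j] in "*X", else n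
--     nxt = [n] * (n + 1)
--     for i in range(n - 1, -1, -1):
--         nxt[i] = i if novel[i] in "*X" else nxt[i + 1]
--     peptides = []
--     for k in lengths:
--         start = max(0, fs_pos - k + 1)
--         for i in range(start, min(fs_pos + 1, n - k + 1)):
--             if nxt[i] >= i + k:
--                 peptides.append(novel[i:i+k])
--     return peptides
-- ===== Notes on version B (the rewrite author's own statement) =====
-- stated objective: alternative
-- what changed: Replaces the per-window substring scans for '*'/'X' (and the per-window length re-check) with a next-forbidden-character index array precomputed right-to-left, so each candidate window is accepted or rejected by one array comparison; only accepted windows are sliced.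
import Mathlib
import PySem

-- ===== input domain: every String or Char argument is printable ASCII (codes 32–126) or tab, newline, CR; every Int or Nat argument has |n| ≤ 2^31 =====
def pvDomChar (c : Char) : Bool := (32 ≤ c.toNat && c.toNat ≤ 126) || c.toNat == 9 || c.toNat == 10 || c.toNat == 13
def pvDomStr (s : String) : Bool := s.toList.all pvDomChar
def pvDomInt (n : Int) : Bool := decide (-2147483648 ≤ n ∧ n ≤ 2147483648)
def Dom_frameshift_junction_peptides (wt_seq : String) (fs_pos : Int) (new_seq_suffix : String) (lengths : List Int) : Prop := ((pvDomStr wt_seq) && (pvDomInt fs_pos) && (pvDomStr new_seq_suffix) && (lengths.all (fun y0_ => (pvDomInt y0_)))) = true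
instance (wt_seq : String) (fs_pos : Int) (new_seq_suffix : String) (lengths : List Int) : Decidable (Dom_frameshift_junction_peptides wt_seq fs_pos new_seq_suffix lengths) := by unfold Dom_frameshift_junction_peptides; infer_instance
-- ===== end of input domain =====

-- B replaces A's per-window substring scans for '*'/'X' (and the per-window length
-- re-check) by a next-forbidden-character index array built once right-to-left,
-- so each window is decided by one array comparison; same return value on every input.

-- ===== PORT A =====
-- Literal transliteration of A: for each k, slice every candidate window and scan
-- it for '*' and 'X' ("c in pep" ported with PySem.Chars.isIn on the slice).
def frameshift_junction_peptides (wt_seq : String) (fs_pos : Int) (new_seq_suffix : String) (lengths : List Int) : List String :=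
  let pfx := PySem.List.slice wt_seq.toList none (some fs_pos)
  let novel := pfx ++ new_seq_suffix.toList
  lengths.foldl (fun peptides k =>
    let start := max 0 (fs_pos - k + 1)
    (PySem.List.pyRange start (min (fs_pos + 1) ((novel.length : Int) - k + 1)) 1).foldl
      (fun peptides i =>
        let pep := PySem.List.slice novel (some i) (some (i + k))
        if !(PySem.Chars.isIn ['*'] pep) && !(PySem.Chars.isIn ['X'] pep)
             && ((pep.length : Int) == k)
        then peptides ++ [String.ofList pep] else peptides)
      peptides) []

-- ===== PORT B =====
-- Source B's right-to-left fill "nxt[i] = i if novel[i] in '*X' else nxt[i+1]",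
-- written as the structural recursion over the suffix starting at index i.
def fsjpNxt : List Char → Int → List Int
  | [], i => [i]
  | c :: rest, i =>
      let t := fsjpNxt rest (i + 1)
      (if c == '*' || c == 'X' then i else t.headD (i + 1)) :: t

-- Source B's nxt[i] is ported with PySem.List.pyGetD (Source B only reads nxt at indices
-- 0 ≤ i ≤ n, where both agree; the default is never used).
def frameshift_junction_peptides_alt (wt_seq : String) (fs_pos : Int) (new_seq_suffix : String) (lengths : List Int) : List String :=
  let novel := PySem.List.slice wt_seq.toList none (some fs_pos) ++ new_seq_suffix.toList
  let n : Int := (novel.length : Int)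
  let nxt := fsjpNxt novel 0
  lengths.foldl (fun peptides k =>
    let start := max 0 (fs_pos - k + 1)
    (PySem.List.pyRange start (min (fs_pos + 1) (n - k + 1)) 1).foldl
      (fun peptides i =>
        if i + k ≤ PySem.List.pyGetD nxt i 0
        then peptides ++ [String.ofList (PySem.List.slice novel (some i) (some (i + k)))]
        else peptides)
      peptides) []

-- ===== PRECONDITION & SPEC =====
def Spec_frameshift_junction_peptides (wt_seq : String) (fs_pos : Int) (new_seq_suffix : String) (lengths : List Int) (out : List String) : Prop := out = frameshift_junction_peptides_alt wt_seq fs_pos new_seq_suffix lengths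
instance (wt_seq : String) (fs_pos : Int) (new_seq_suffix : String) (lengths : List Int) (out : List String) : Decidable (Spec_frameshift_junction_peptides wt_seq fs_pos new_seq_suffix lengths out) := by unfold Spec_frameshift_junction_peptides; infer_instance

-- ===== CLAIM (what is proved, stated in full; the proofs are below) =====
def Claim_equal_frameshift_junction_peptides : Prop := ∀ (wt_seq : String) (fs_pos : Int) (new_seq_suffix : String) (lengths : List Int), Dom_frameshift_junction_peptides wt_seq fs_pos new_seq_suffix lengths → Spec_frameshift_junction_peptides wt_seq fs_pos new_seq_suffix lengths (frameshift_junction_peptides wt_seq fs_pos new_seq_suffix lengths)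

-- ===== LEMMAS AND PROOFS =====

def fsjpForb (c : Char) : Bool := c == '*' || c == 'X'

theorem fsjpNxt_length (cs : List Char) (i : Int) : (fsjpNxt cs i).length = cs.length + 1 := by
  induction cs generalizing i with
  | nil => simp [fsjpNxt]
  | cons c rest ih => simp [fsjpNxt, ih]

theorem fsjpNxt_getElem? (cs : List Char) (i : Int) (j : Nat) (hj : j ≤ cs.length) :
    (fsjpNxt cs i)[j]? = some (i + j + ((cs.drop j).findIdx fsjpForb : Int)) := by
  induction cs generalizing i j with
  | nil =>
      have hj0 : j = 0 := Nat.le_zero.mp (by simpa using hj)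
      subst hj0
      simp [fsjpNxt]
  | cons c rest ih =>
      cases j with
      | zero =>
          have ht := ih (i + 1) 0 (Nat.zero_le _)
          simp only [List.drop_zero, Nat.cast_zero] at ht
          cases hc : fsjpForb c with
          | true =>
              simp [fsjpNxt, show (c == '*' || c == 'X') = true from hc,
                    List.findIdx_cons, hc]
          | false =>
              cases hfx : fsjpNxt rest (i + 1) with
              | nil => rw [hfx] at ht; simp at ht
              | cons x t =>
                  rw [hfx] at ht
                  simp only [List.getElem?_cons_zero, Option.some.injEq] at ht
                  simp [fsjpNxt, show (c == '*' || c == 'X') = false from hc,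
                        hfx, List.findIdx_cons, hc, ht]
                  ring
      | succ j' =>
          have := ih (i + 1) j' (by simpa using hj)
          simp [fsjpNxt, this]
          omega

-- the per-window conditions of A and B agree on every index the loops visit
theorem fsjp_cond_eq (novel : List Char) (k i : Int)
    (hi : 0 ≤ i) (hk : 1 ≤ k) (hik : i + k ≤ (novel.length : Int)) :
    (!(PySem.Chars.isIn ['*'] (PySem.List.slice novel (some i) (some (i + k)))) &&
     !(PySem.Chars.isIn ['X'] (PySem.List.slice novel (some i) (some (i + k)))) &&
     (((PySem.List.slice novel (some i) (some (i + k))).length : Int) == k))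
    = decide (i + k ≤ PySem.List.pyGetD (fsjpNxt novel 0) i 0) := by
  have hik' : 0 ≤ i + k := by omega
  rw [PySem.List.slice_toNat novel hi hik']
  set a := i.toNat with ha
  have hkk : (i + k).toNat - a = k.toNat := by omega
  rw [hkk]
  set pep := List.take k.toNat (List.drop a novel) with hpep
  have hlend : a + k.toNat ≤ novel.length := by omega
  have hpl : pep.length = k.toNat := by simp [hpep]; omega
  -- right-hand side: evaluate the nxt lookup
  rw [PySem.List.pyGetD_of_nonneg _ _ hi]
  have hja : a ≤ novel.length := by omega
  have hget := fsjpNxt_getElem? novel 0 a hja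
  have hlt : a < (fsjpNxt novel 0).length := by rw [fsjpNxt_length]; omega
  have hgd : (fsjpNxt novel 0).getD a 0
      = 0 + (a : Int) + (((novel.drop a).findIdx fsjpForb : Nat) : Int) := by
    rw [List.getD_eq_getElem _ _ hlt]
    rw [List.getElem?_eq_getElem hlt] at hget
    exact Option.some.inj hget
  rw [hgd]
  set d := (novel.drop a).findIdx fsjpForb with hd
  have hiff : (i + k ≤ 0 + (a : Int) + (d : Int)) ↔ k.toNat ≤ d := by omega
  have hdroplen : (novel.drop a).length = novel.length - a := by simp
  -- both sides say: no forbidden character in the window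
  have hfa : (k.toNat ≤ d) ↔ ∀ x ∈ pep, fsjpForb x = false := by
    constructor
    · intro hle x hx
      rcases List.mem_take_iff_getElem.mp (hpep ▸ hx) with ⟨j, hjlt, rfl⟩
      have hjd : j < d := by omega
      rcases (List.lt_findIdx_iff (novel.drop a) fsjpForb j).mp (hd ▸ hjd) with ⟨h1, h2⟩
      exact h2 j (le_refl j)
    · intro hall
      by_contra hlt'
      rw [Nat.not_le] at hlt'
      have hdl : d < (novel.drop a).length := by
        have := List.findIdx_le_length (p := fsjpForb) (xs := novel.drop a)
        omega
      have hpd : fsjpForb (novel.drop a)[d] = true :=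
        @List.findIdx_getElem _ fsjpForb (novel.drop a) (hd ▸ hdl)
      have hmem : (novel.drop a)[d] ∈ pep :=
        List.mem_take_iff_getElem.mpr ⟨d, by omega, rfl⟩
      have := hall _ hmem
      rw [this] at hpd
      exact Bool.false_ne_true hpd
  have hstar : PySem.Chars.isIn ['*'] pep = false ↔ '*' ∉ pep := by
    rw [PySem.Chars.isIn_eq_false_iff, List.singleton_infix_iff]
  have hX : PySem.Chars.isIn ['X'] pep = false ↔ 'X' ∉ pep := by
    rw [PySem.Chars.isIn_eq_false_iff, List.singleton_infix_iff]
  have hlenk : ((pep.length : Int) == k) = true := by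
    simp [hpl]; omega
  by_cases hok : ∀ x ∈ pep, fsjpForb x = false
  · have h1 : '*' ∉ pep := fun hmem => by
      have := hok _ hmem; simp [fsjpForb] at this
    have h2 : 'X' ∉ pep := fun hmem => by
      have := hok _ hmem; simp [fsjpForb] at this
    rw [hstar.mpr h1, hX.mpr h2, hlenk,
        decide_eq_true (hiff.mpr (hfa.mpr hok))]
    rfl
  · have hrhs : decide (i + k ≤ 0 + (a : Int) + (d : Int)) = false := by
      simp only [decide_eq_false_iff_not, hiff]
      intro h
      exact hok (hfa.mp h)
    simp only [not_forall, exists_prop] at hok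
    obtain ⟨x, hxmem, hxforb⟩ := hok
    have hx' : x = '*' ∨ x = 'X' := by
      have : fsjpForb x = true := by
        cases hxf : fsjpForb x with
        | true => rfl
        | false => exact absurd hxf hxforb
      simpa [fsjpForb] using this
    have hin : PySem.Chars.isIn ['*'] pep = true ∨ PySem.Chars.isIn ['X'] pep = true := by
      rcases hx' with rfl | rfl
      · left; by_contra h
        exact (hstar.mp (Bool.not_eq_true _ ▸ Bool.eq_false_iff.mpr h)) hxmem
      · right; by_contra h
        exact (hX.mp (Bool.not_eq_true _ ▸ Bool.eq_false_iff.mpr h)) hxmem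
    rw [hrhs]
    rcases hin with h | h <;> simp [h]

theorem fsjp_inner_eq (novel : List Char) (fs_pos : Int) (k : Int) (acc : List String) :
    (PySem.List.pyRange (max 0 (fs_pos - k + 1)) (min (fs_pos + 1) ((novel.length : Int) - k + 1)) 1).foldl
      (fun peptides i =>
        let pep := PySem.List.slice novel (some i) (some (i + k))
        if !(PySem.Chars.isIn ['*'] pep) && !(PySem.Chars.isIn ['X'] pep)
             && ((pep.length : Int) == k)
        then peptides ++ [String.ofList pep] else peptides) acc
    = (PySem.List.pyRange (max 0 (fs_pos - k + 1)) (min (fs_pos + 1) ((novel.length : Int) - k + 1)) 1).foldl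
      (fun peptides i =>
        if i + k ≤ PySem.List.pyGetD (fsjpNxt novel 0) i 0
        then peptides ++ [String.ofList (PySem.List.slice novel (some i) (some (i + k)))]
        else peptides) acc := by
  apply PySem.List.foldl_congr_mem
  intro acc' i hi
  rw [PySem.List.mem_pyRange_one] at hi
  obtain ⟨h1, h2⟩ := hi
  have hi0 : 0 ≤ i := le_trans (le_max_left _ _) h1
  have hk1 : 1 ≤ k := by
    have := le_trans (le_max_right _ _) h1
    have := lt_of_lt_of_le h2 (min_le_left _ _)
    omega
  have hik : i + k ≤ (novel.length : Int) := by
    have := lt_of_lt_of_le h2 (min_le_right _ _)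
    omega
  simp only
  rw [fsjp_cond_eq novel k i hi0 hk1 hik]
  by_cases h : i + k ≤ PySem.List.pyGetD (fsjpNxt novel 0) i 0 <;> simp [h]

-- ===== VERDICT (by name: the statement is the Claim_ definition above) =====
theorem frameshift_junction_peptides_spec : Claim_equal_frameshift_junction_peptides := by
  intro wt_seq fs_pos new_seq_suffix lengths _
  unfold Spec_frameshift_junction_peptides frameshift_junction_peptides frameshift_junction_peptides_alt
  simp only
  apply PySem.List.foldl_congr_mem
  intro acc k _
  exact fsjp_inner_eq _ fs_pos k acc
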